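-- pv_equiv track=rewrite | github.com/epilectrik/voynich | archive/scripts/currier_a_repetition_stabilizer.py | classify_entry_universality
-- ===== SOURCE A (Python) =====
-- def classify_entry_universality(middles, middle_prefix_count):
--     """
--     Classify entry by MIDDLE universality.
--
--     Returns:
--     - 'universal': >=1 MIDDLE in >=6 prefix classes
--     - 'mixed': both universal (>=6) and exclusive (=1)
--     - 'shared': all MIDDLEs in 2-5 prefix classes
--     - 'exclusive': all MIDDLEs in 1 prefix class only
--     """
--     if not middles:
--         return 'unknown'
--
--     universality_scores = []
--     for m in middles:
--         score = middle_prefix_count.get(m, 1)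
--         universality_scores.append(score)
--
--     has_universal = any(s >= 6 for s in universality_scores)
--     has_exclusive = any(s == 1 for s in universality_scores)
--     all_exclusive = all(s == 1 for s in universality_scores)
--     all_shared = all(2 <= s <= 5 for s in universality_scores)
--
--     if has_universal and has_exclusive:
--         return 'mixed'
--     elif has_universal:
--         return 'universal'
--     elif all_exclusive:
--         return 'exclusive'
--     elif all_shared:
--         return 'shared'
--     else:
--         return 'mixed'  # Combination of shared and exclusive
-- ===== SOURCE B (Python) =====
-- def classify_entry_universality(middles, middle_prefix_count):
--     if not middles:
--         return 'unknown'
--     bands = set()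
--     for m in middles:
--         score = middle_prefix_count.get(m, 1)
--         if score >= 6:
--             bands.add('U')
--         elif score == 1:
--             bands.add('E')
--         elif 2 <= score <= 5:
--             bands.add('S')
--         else:
--             bands.add('O')
--     if 'U' in bands and 'E' in bands:
--         return 'mixed'
--     if 'U' in bands:
--         return 'universal'
--     if bands == {'E'}:
--         return 'exclusive'
--     if bands == {'S'}:
--         return 'shared'
--     return 'mixed'
-- ===== Notes on version B (the rewrite author's own statement) =====
-- stated objective: simpler
-- what changed: Replaces the scores list and the four any/all comprehension passes with a single pass over middles that maps each score to a band label kept in a set, and reads the verdict off the set of bands.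
import Mathlib
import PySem

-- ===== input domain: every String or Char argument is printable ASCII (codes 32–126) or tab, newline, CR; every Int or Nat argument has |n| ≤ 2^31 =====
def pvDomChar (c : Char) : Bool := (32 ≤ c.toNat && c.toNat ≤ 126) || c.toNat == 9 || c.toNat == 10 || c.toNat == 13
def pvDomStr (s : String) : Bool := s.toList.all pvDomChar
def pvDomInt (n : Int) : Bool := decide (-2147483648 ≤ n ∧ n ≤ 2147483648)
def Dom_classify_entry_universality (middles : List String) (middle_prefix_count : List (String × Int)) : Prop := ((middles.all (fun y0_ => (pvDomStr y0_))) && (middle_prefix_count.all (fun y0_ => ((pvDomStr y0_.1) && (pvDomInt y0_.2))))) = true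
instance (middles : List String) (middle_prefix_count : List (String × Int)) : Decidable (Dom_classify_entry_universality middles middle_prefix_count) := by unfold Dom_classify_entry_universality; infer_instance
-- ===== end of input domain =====

-- B replaces A's scores list and four any/all passes by one pass collecting a set of band labels; objective: simpler.

-- ===== PORT A =====
def classify_entry_universality (middles : List String) (middle_prefix_count : List (String × Int)) : String :=
  if middles = [] then "unknown"
  else
    let universality_scores : List Int :=
      middles.foldl (fun acc m => acc ++ [PySem.Dict.getD (PySem.Dict.mk middle_prefix_count) m 1]) []
    let has_universal := universality_scores.any (fun s => decide (6 ≤ s))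
    let has_exclusive := universality_scores.any (fun s => s == 1)
    let all_exclusive := universality_scores.all (fun s => s == 1)
    let all_shared := universality_scores.all (fun s => decide (2 ≤ s ∧ s ≤ 5))
    if has_universal && has_exclusive then "mixed"
    else if has_universal then "universal"
    else if all_exclusive then "exclusive"
    else if all_shared then "shared"
    else "mixed"

-- ===== PORT B =====
-- the band label of one score
def pvBand (s : Int) : String :=
  if 6 ≤ s then "U" else if s == 1 then "E" else if 2 ≤ s ∧ s ≤ 5 then "S" else "O"

def classify_entry_universality_alt (middles : List String) (middle_prefix_count : List (String × Int)) : String :=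
  if middles = [] then "unknown"
  else
    let bands : PySem.Set String :=
      middles.foldl (fun bs m => PySem.Set.add bs (pvBand (PySem.Dict.getD (PySem.Dict.mk middle_prefix_count) m 1))) PySem.Set.empty
    if PySem.Set.contains bands "U" && PySem.Set.contains bands "E" then "mixed"
    else if PySem.Set.contains bands "U" then "universal"
    else if PySem.Set.equal bands ["E"] then "exclusive"
    else if PySem.Set.equal bands ["S"] then "shared"
    else "mixed"

-- ===== PRECONDITION & SPEC =====
def Spec_classify_entry_universality (middles : List String) (middle_prefix_count : List (String × Int)) (out : String) : Prop := out = classify_entry_universality_alt middles middle_prefix_count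
instance (middles : List String) (middle_prefix_count : List (String × Int)) (out : String) : Decidable (Spec_classify_entry_universality middles middle_prefix_count out) := by unfold Spec_classify_entry_universality; infer_instance

-- ===== CLAIM (what is proved, stated in full; the proofs are below) =====
def Claim_equal_classify_entry_universality : Prop := ∀ (middles : List String) (middle_prefix_count : List (String × Int)), Dom_classify_entry_universality middles middle_prefix_count → Spec_classify_entry_universality middles middle_prefix_count (classify_entry_universality middles middle_prefix_count)

-- ===== LEMMAS AND PROOFS =====

theorem pvBand_eq_U (s : Int) : pvBand s = "U" ↔ 6 ≤ s := by
  unfold pvBand; split_ifs <;> simp_all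

theorem pvBand_eq_E (s : Int) : pvBand s = "E" ↔ s = 1 := by
  unfold pvBand; split_ifs <;> simp_all; omega

theorem pvBand_eq_S (s : Int) : pvBand s = "S" ↔ (2 ≤ s ∧ s ≤ 5) := by
  unfold pvBand; split_ifs <;> simp_all; omega

theorem bands_eq_ofList (middles : List String) (d : List (String × Int)) :
    middles.foldl (fun bs m => PySem.Set.add bs (pvBand (PySem.Dict.getD (PySem.Dict.mk d) m 1))) PySem.Set.empty
      = PySem.Set.ofList ((middles.map (fun m => PySem.Dict.getD (PySem.Dict.mk d) m 1)).map pvBand) := by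
  rw [PySem.Set.ofList_eq_foldl, List.foldl_map, List.foldl_map]
  rfl

theorem scores_eq_map (middles : List String) (d : List (String × Int)) :
    middles.foldl (fun acc m => acc ++ [PySem.Dict.getD (PySem.Dict.mk d) m 1]) []
      = middles.map (fun m => PySem.Dict.getD (PySem.Dict.mk d) m 1) := by
  rw [PySem.List.foldl_append_singleton_eq_map]
  simp

theorem contains_U (ls : List Int) :
    PySem.Set.contains (PySem.Set.ofList (ls.map pvBand)) "U" = ls.any (fun s => decide (6 ≤ s)) := by
  rw [Bool.eq_iff_iff]
  simp [PySem.Set.mem_ofList, List.any_eq_true, pvBand_eq_U]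

theorem contains_E (ls : List Int) :
    PySem.Set.contains (PySem.Set.ofList (ls.map pvBand)) "E" = ls.any (fun s => s == 1) := by
  rw [Bool.eq_iff_iff]
  simp [PySem.Set.mem_ofList, List.any_eq_true, pvBand_eq_E]

theorem equal_single (ls : List Int) (hne : ls ≠ []) (lbl : String)
    (P : Int → Prop) [DecidablePred P] (hchar : ∀ s, pvBand s = lbl ↔ P s) :
    PySem.Set.equal (PySem.Set.ofList (ls.map pvBand)) [lbl] = ls.all (fun s => decide (P s)) := by
  rw [Bool.eq_iff_iff, PySem.Set.equal_iff]
  simp only [PySem.Set.mem_ofList, List.mem_map, List.mem_singleton, List.all_eq_true,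
    decide_eq_true_eq]
  constructor
  · intro h s hs
    exact (hchar s).mp ((h (pvBand s)).mp ⟨s, hs, rfl⟩)
  · intro h x
    constructor
    · rintro ⟨s, hs, rfl⟩; exact (hchar s).mpr (h s hs)
    · rintro rfl
      obtain ⟨s, hs⟩ := List.exists_mem_of_ne_nil ls hne
      exact ⟨s, hs, (hchar s).mpr (h s hs)⟩

-- ===== VERDICT (by name: the statement is the Claim_ definition above) =====
theorem classify_entry_universality_spec : Claim_equal_classify_entry_universality := by
  intro middles d _
  unfold Spec_classify_entry_universality classify_entry_universality classify_entry_universality_alt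
  by_cases hnil : middles = []
  · simp [hnil]
  · simp only [if_neg hnil]
    rw [bands_eq_ofList, scores_eq_map]
    set ls := middles.map (fun m => PySem.Dict.getD (PySem.Dict.mk d) m 1) with hls
    have hne : ls ≠ [] := by simp [hls, hnil]
    rw [contains_U, contains_E,
      equal_single ls hne "E" (fun s => s = 1) (fun s => pvBand_eq_E s),
      equal_single ls hne "S" (fun s => 2 ≤ s ∧ s ≤ 5) (fun s => pvBand_eq_S s)]
    simp
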